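-- pv_equiv track=rewrite | github.com/ian-hickey/CodeReviewGPT | code-review.py | encode_segments
-- ===== SOURCE A (Python) =====
-- def encode_segments(tokens, TOKEN_SIZE):
--     """Chunk tokens into segments
--
--     Parameters:
--     - tokens: The tokens to chunk
--     - TOKEN_SIZE: The number of tokens per chunk
--
--     Returns:
--     - A segment of size TOKEN_SIZE to send to CHATGPT
--     """
--     segments = []
--     curr_len = 0
--     curr_segment = []
--     for token in tokens:
--         curr_len += 1
--         curr_segment.append(token)
--         if curr_len >= TOKEN_SIZE: # example chunk size
--             segments.append("".join(curr_segment))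
--             curr_segment = []
--             curr_len = 0
--
--     if curr_segment:
--         segments.append("".join(curr_segment))
--
--     return segments
-- ===== SOURCE B (Python) =====
-- def encode_segments(tokens, TOKEN_SIZE):
--     """Chunk tokens into segments of TOKEN_SIZE joined strings (take/drop style)."""
--     toks = list(tokens)
--     step = TOKEN_SIZE if TOKEN_SIZE > 0 else 1
--     segments = []
--     while toks:
--         segments.append("".join(toks[:step]))
--         toks = toks[step:]
--     return segments
-- ===== Notes on version B (the rewrite author's own statement) =====
-- stated objective: simpler
-- what changed: Replaces the running-length counter, per-token append and trailing-remainder flush with a head-slicing loop: repeatedly join the first step tokens and drop them, where step = TOKEN_SIZE when positive and 1 otherwise (reproducing A's one-token-per-segment behaviour for non-positive TOKEN_SIZE).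
import Mathlib
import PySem

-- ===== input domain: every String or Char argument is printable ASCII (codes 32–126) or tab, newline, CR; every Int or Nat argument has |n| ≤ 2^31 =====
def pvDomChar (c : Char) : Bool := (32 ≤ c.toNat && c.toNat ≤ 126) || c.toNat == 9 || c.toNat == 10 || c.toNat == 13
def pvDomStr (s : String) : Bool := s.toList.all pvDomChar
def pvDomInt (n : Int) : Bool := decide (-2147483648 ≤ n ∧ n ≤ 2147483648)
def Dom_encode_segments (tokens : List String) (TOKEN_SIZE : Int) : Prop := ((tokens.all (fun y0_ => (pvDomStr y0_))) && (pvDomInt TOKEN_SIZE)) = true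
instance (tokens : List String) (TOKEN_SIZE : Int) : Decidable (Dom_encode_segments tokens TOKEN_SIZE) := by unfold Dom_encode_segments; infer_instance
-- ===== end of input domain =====

-- B replaces A's running-length counter, per-token append and trailing flush with a
-- head-slicing loop (join the first `step` tokens, drop them, repeat): a simpler decomposition, same cost.


-- ===== PORT A =====
-- A's loop body over its three variables (segments, curr_len, curr_segment)
def bodyA (TOKEN_SIZE : Int) (st : List String × Int × List String) (token : String) :
    List String × Int × List String :=
  let segments := st.1
  let curr_len := st.2.1 + 1
  let curr_segment := st.2.2 ++ [token]
  if curr_len ≥ TOKEN_SIZE then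
    (segments ++ [PySem.Str.join "" curr_segment], 0, ([] : List String))
  else
    (segments, curr_len, curr_segment)

def encode_segments (tokens : List String) (TOKEN_SIZE : Int) : List String :=
  let st := tokens.foldl (bodyA TOKEN_SIZE) ([], 0, [])
  if st.2.2 ≠ [] then st.1 ++ [PySem.Str.join "" st.2.2] else st.1

-- ===== PORT B =====
-- B's while-loop: for step ≥ 1, toks[:step] / toks[step:] are exactly take/drop of step.toNat
-- (PySem.List.slice_to / slice_from); the positive chunk size step is encoded as s + 1 for termination.
def encAltGo (s : Nat) : List String → List String
  | [] => []
  | t :: ts =>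
      PySem.Str.join "" ((t :: ts).take (s + 1)) :: encAltGo s ((t :: ts).drop (s + 1))
  termination_by l => l.length
  decreasing_by simp

def encode_segments_alt (tokens : List String) (TOKEN_SIZE : Int) : List String :=
  let step := if TOKEN_SIZE > 0 then TOKEN_SIZE else 1
  encAltGo (step - 1).toNat tokens

-- ===== PRECONDITION & SPEC =====
def Spec_encode_segments (tokens : List String) (TOKEN_SIZE : Int) (out : List String) : Prop := out = encode_segments_alt tokens TOKEN_SIZE
instance (tokens : List String) (TOKEN_SIZE : Int) (out : List String) : Decidable (Spec_encode_segments tokens TOKEN_SIZE out) := by unfold Spec_encode_segments; infer_instance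

-- ===== CLAIM (what is proved, stated in full; the proofs are below) =====
def Claim_equal_encode_segments : Prop := ∀ (tokens : List String) (TOKEN_SIZE : Int), Dom_encode_segments tokens TOKEN_SIZE → Spec_encode_segments tokens TOKEN_SIZE (encode_segments tokens TOKEN_SIZE)

-- ===== LEMMAS AND PROOFS =====

theorem encAltGo_nonempty (s : Nat) (l : List String) (h : l ≠ []) :
    encAltGo s l = PySem.Str.join "" (l.take (s + 1)) :: encAltGo s (l.drop (s + 1)) := by
  cases l with
  | nil => exact absurd rfl h
  | cons t ts => rw [encAltGo]

theorem bodyA_full (TOKEN_SIZE : Int) (segs cs : List String) (n : Int) (t : String)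
    (h : n + 1 ≥ TOKEN_SIZE) :
    bodyA TOKEN_SIZE (segs, n, cs) t = (segs ++ [PySem.Str.join "" (cs ++ [t])], 0, []) := by
  simp [bodyA, h]

theorem bodyA_notfull (TOKEN_SIZE : Int) (segs cs : List String) (n : Int) (t : String)
    (h : ¬ (n + 1 ≥ TOKEN_SIZE)) :
    bodyA TOKEN_SIZE (segs, n, cs) t = (segs, n + 1, cs ++ [t]) := by
  simp only [bodyA, if_neg h]

-- flush of A's final state, as it appears in encode_segments
def flushA (st : List String × Int × List String) : List String :=
  if st.2.2 ≠ [] then st.1 ++ [PySem.Str.join "" st.2.2] else st.1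

-- loop invariant: running A's loop from state (segs, |cs|, cs) with |cs| ≤ s and then
-- flushing equals segs followed by B's head-slicing chunking of cs ++ toks (chunk size s + 1)
theorem loopA_eq (s : Nat) (TOKEN_SIZE : Int)
    (hstep : (if TOKEN_SIZE > 0 then TOKEN_SIZE else 1) = (s : Int) + 1) :
    ∀ (toks cs segs : List String), cs.length ≤ s →
      flushA (toks.foldl (bodyA TOKEN_SIZE) (segs, (cs.length : Int), cs))
        = segs ++ encAltGo s (cs ++ toks) := by
  intro toks
  induction toks with
  | nil =>
      intro cs segs hle
      rw [List.foldl_nil, List.append_nil]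
      cases cs with
      | nil => simp [flushA, encAltGo]
      | cons c cs' =>
          rw [encAltGo_nonempty s _ (by simp)]
          have hlen : (c :: cs').length ≤ s + 1 := by omega
          have hdrop : (c :: cs').drop (s + 1) = [] := by
            rw [List.drop_eq_nil_iff]; omega
          rw [List.take_of_length_le hlen, hdrop]
          simp [flushA, encAltGo]
  | cons t ts ih =>
      intro cs segs hle
      rw [List.foldl_cons]
      by_cases hfull : (cs.length : Int) + 1 ≥ TOKEN_SIZE
      · -- chunk complete here: cs.length = s (when TOKEN_SIZE ≤ 0, hstep forces s = 0)
        have hcs : cs.length = s := by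
          by_cases hpos : TOKEN_SIZE > 0
          · rw [if_pos hpos] at hstep; omega
          · rw [if_neg hpos] at hstep; omega
        rw [bodyA_full TOKEN_SIZE segs cs _ t hfull]
        have h0 : ((0 : Int) = (([] : List String).length : Int)) := by simp
        rw [h0, ih ([] : List String) (segs ++ [PySem.Str.join "" (cs ++ [t])]) (by omega)]
        rw [encAltGo_nonempty s (cs ++ t :: ts) (by simp)]
        have htake : (cs ++ t :: ts).take (s + 1) = cs ++ [t] := by
          rw [List.take_append]
          rw [List.take_of_length_le (by omega), hcs]
          simp
        have hdrop : (cs ++ t :: ts).drop (s + 1) = ts := by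
          rw [List.drop_append]
          rw [List.drop_eq_nil_iff.mpr (by omega), hcs]
          simp
        rw [htake, hdrop]
        simp
      · -- chunk not complete: cs.length < s and the state just grows
        have hlt : cs.length < s := by
          by_cases hpos : TOKEN_SIZE > 0
          · rw [if_pos hpos] at hstep; omega
          · rw [if_neg hpos] at hstep; omega
        rw [bodyA_notfull TOKEN_SIZE segs cs _ t hfull]
        have hcast : ((cs.length : Int) + 1) = (((cs ++ [t]).length : Nat) : Int) := by
          simp
        rw [hcast, ih (cs ++ [t]) segs (by simp; omega)]
        simp

-- ===== VERDICT (by name: the statement is the Claim_ definition above) =====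
theorem encode_segments_spec : Claim_equal_encode_segments := by
  intro tokens TOKEN_SIZE _
  unfold Spec_encode_segments encode_segments encode_segments_alt
  have hstep1 : (1 : Int) ≤ (if TOKEN_SIZE > 0 then TOKEN_SIZE else 1) := by
    split <;> omega
  have hstep : (if TOKEN_SIZE > 0 then TOKEN_SIZE else 1)
      = ((((if TOKEN_SIZE > 0 then TOKEN_SIZE else 1) - 1).toNat : Nat) : Int) + 1 := by
    omega
  have h := loopA_eq (((if TOKEN_SIZE > 0 then TOKEN_SIZE else 1) - 1).toNat) TOKEN_SIZE hstep
    tokens [] [] (by simp)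
  simpa [flushA] using h
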